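-- pv_equiv track=rewrite | github.com/noe/iterative_expansion_lms | src/syntaxd/data/dependency/transitions.py | expand_heads
-- ===== SOURCE A (Python) =====
-- from typing import Iterable, List, Optional
--
-- def expand_heads(num_tokens: int,
--                  new_idx2old_idx,
--                  old_idx2new_idx,
--                  prev_level_heads,
--                  next_level_heads,
--                  ) -> List[List[int]]:
--     """
--     Expands the dependencies after a token expansion.
--     :param num_tokens: number of tokens in the next level.
--     :param new_idx2old_idx: associations between new indexes and old ones.
--     :param old_idx2new_idx: associations between old indexes and new ones.
--     :param prev_level_heads: heads of the previous level.
--     :param next_level_heads: new heads just expanded.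
--     :return: the expanded dependency matrix.
--     """
--     expanded_heads = [None] * num_tokens
--     for new_idx in range(num_tokens):
--         if new_idx in new_idx2old_idx:
--             old_idx = new_idx2old_idx[new_idx]
--             head_old_idx = prev_level_heads[old_idx]
--             head_new_idx = -1 if head_old_idx == -1 else old_idx2new_idx[head_old_idx]
--             expanded_heads[new_idx] = head_new_idx
--         else:
--             expanded_heads[new_idx] = next_level_heads[new_idx]
--
--     return expanded_heads
-- ===== SOURCE B (Python) =====
-- def expand_heads(num_tokens, new_idx2old_idx, old_idx2new_idx, prev_level_heads, next_level_heads):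
--     # Sort-then-merge: precompute the remapped (new_idx, head) pairs, sort them by
--     # new_idx, then merge with the index stream using a single advancing pointer --
--     # no per-index dict membership test at all.
--     remapped = sorted(
--         ((new_idx,
--           -1 if prev_level_heads[old_idx] == -1
--           else old_idx2new_idx[prev_level_heads[old_idx]])
--          for new_idx, old_idx in new_idx2old_idx.items()
--          if 0 <= new_idx < num_tokens),
--         key=lambda t: t[0])
--     out = []
--     k = 0
--     for i in range(num_tokens):
--         if k < len(remapped) and remapped[k][0] == i:
--             out.append(remapped[k][1])
--             k += 1
--         else:
--             out.append(next_level_heads[i])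
--     return out
-- ===== Notes on version B (the rewrite author's own statement) =====
-- stated objective: alternative
-- what changed: B uses a sort-then-merge strategy: it precomputes the remapped (new_idx, head) pairs for in-range dict entries, sorts them by new_idx, and merges them with the index stream via a single advancing pointer, so the scan over range(num_tokens) does no dict membership test at all.
import Mathlib
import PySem

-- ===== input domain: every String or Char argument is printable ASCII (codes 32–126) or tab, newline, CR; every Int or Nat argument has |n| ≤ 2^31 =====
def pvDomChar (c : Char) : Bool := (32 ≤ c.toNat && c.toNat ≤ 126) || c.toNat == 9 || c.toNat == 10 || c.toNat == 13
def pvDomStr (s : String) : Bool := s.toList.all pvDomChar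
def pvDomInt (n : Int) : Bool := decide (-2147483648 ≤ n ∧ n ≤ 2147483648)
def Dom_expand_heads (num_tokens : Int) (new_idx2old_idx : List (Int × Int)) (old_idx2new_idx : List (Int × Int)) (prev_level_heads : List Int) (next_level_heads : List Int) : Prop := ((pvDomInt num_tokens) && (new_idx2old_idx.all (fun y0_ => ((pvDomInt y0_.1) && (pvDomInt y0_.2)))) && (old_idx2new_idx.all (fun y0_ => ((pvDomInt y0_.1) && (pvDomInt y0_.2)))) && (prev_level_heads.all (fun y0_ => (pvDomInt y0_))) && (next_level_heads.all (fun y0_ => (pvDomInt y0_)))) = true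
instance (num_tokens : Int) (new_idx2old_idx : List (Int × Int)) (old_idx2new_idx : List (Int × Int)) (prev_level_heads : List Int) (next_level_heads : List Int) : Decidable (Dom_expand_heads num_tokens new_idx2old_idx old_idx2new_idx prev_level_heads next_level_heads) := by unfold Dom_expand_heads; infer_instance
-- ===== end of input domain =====

-- B replaces A's range-scan with a dict membership branch by sort-then-merge: the remapped
-- pairs are sorted by new index and merged with the index stream by one advancing pointer
-- (alternative algorithm, same practical cost); equivalence is about the return value only.

-- ===== PORT A =====
-- A assigns expanded_heads[new_idx] once for every new_idx in range(num_tokens) — a map over the range.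
def expand_heads (num_tokens : Int) (new_idx2old_idx : List (Int × Int)) (old_idx2new_idx : List (Int × Int)) (prev_level_heads : List Int) (next_level_heads : List Int) : List Int :=
  (PySem.List.pyRange 0 num_tokens 1).map (fun new_idx =>
    match (PySem.Dict.mk new_idx2old_idx).get? new_idx with
    | some old_idx =>
        -- prev_level_heads[old_idx]; IndexError (none) excluded by Pre_
        let head_old_idx := (PySem.List.pyGet? prev_level_heads old_idx).getD 0
        -- old_idx2new_idx[head_old_idx]; KeyError excluded by Pre_
        if head_old_idx = -1 then -1 else (PySem.Dict.mk old_idx2new_idx).getD head_old_idx 0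
    | none =>
        -- next_level_heads[new_idx]; IndexError excluded by Pre_
        (PySem.List.pyGet? next_level_heads new_idx).getD 0)

-- ===== PORT B =====
def expand_heads_alt (num_tokens : Int) (new_idx2old_idx : List (Int × Int)) (old_idx2new_idx : List (Int × Int)) (prev_level_heads : List Int) (next_level_heads : List Int) : List Int :=
  -- remapped = sorted((new, remap(old)) for in-range items, key = new index)
  let remapped := PySem.List.sorted
    ((new_idx2old_idx.filter (fun p => decide (0 ≤ p.1 ∧ p.1 < num_tokens))).map
      (fun p =>
        let head_old_idx := (PySem.List.pyGet? prev_level_heads p.2).getD 0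
        (p.1, if head_old_idx = -1 then -1 else (PySem.Dict.mk old_idx2new_idx).getD head_old_idx 0)))
    (fun t => t.1) false
  -- merge loop: advancing pointer k into remapped, state (out, k)
  ((PySem.List.pyRange 0 num_tokens 1).foldl
    (fun (st : List Int × Nat) i =>
      match remapped[st.2]? with
      | some p =>
          if p.1 = i then (st.1 ++ [p.2], st.2 + 1)
          else (st.1 ++ [(PySem.List.pyGet? next_level_heads i).getD 0], st.2)
      | none => (st.1 ++ [(PySem.List.pyGet? next_level_heads i).getD 0], st.2))
    ([], 0)).1

-- ===== PRECONDITION & SPEC =====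
-- Pre_ excludes (a) inputs on which the Python raises (IndexError on prev_level_heads /
-- next_level_heads, KeyError on old_idx2new_idx) and (b) association lists with duplicate keys,
-- which do not arise from a Python dict argument.  The last conjunct says, by counting distinct
-- keys, that every index of range(num_tokens) that is not a dict key is a valid next_level_heads index.
def Pre_expand_heads (num_tokens : Int) (new_idx2old_idx : List (Int × Int)) (old_idx2new_idx : List (Int × Int)) (prev_level_heads : List Int) (next_level_heads : List Int) : Prop :=
  (new_idx2old_idx.map Prod.fst).Nodup ∧
  (∀ p ∈ new_idx2old_idx, 0 ≤ p.1 → p.1 < num_tokens →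
     (PySem.List.pyGet? prev_level_heads p.2).isSome = true ∧
     ((PySem.List.pyGet? prev_level_heads p.2).getD 0 = -1 ∨
      (PySem.Dict.mk old_idx2new_idx).contains ((PySem.List.pyGet? prev_level_heads p.2).getD 0) = true)) ∧
  (num_tokens ≤ (next_level_heads.length : Int) ∨
   num_tokens - (next_level_heads.length : Int) ≤
     (new_idx2old_idx.countP (fun p => decide ((next_level_heads.length : Int) ≤ p.1 ∧ p.1 < num_tokens)) : Int))
instance (num_tokens : Int) (new_idx2old_idx : List (Int × Int)) (old_idx2new_idx : List (Int × Int)) (prev_level_heads : List Int) (next_level_heads : List Int) : Decidable (Pre_expand_heads num_tokens new_idx2old_idx old_idx2new_idx prev_level_heads next_level_heads) := by unfold Pre_expand_heads; infer_instance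

def pvWitness_expand_heads : Int × (List (Int × Int)) × (List (Int × Int)) × List Int × List Int := (2, [(0, 0)], [(1, 1)], [-1], [5, 7])

def Spec_expand_heads (num_tokens : Int) (new_idx2old_idx : List (Int × Int)) (old_idx2new_idx : List (Int × Int)) (prev_level_heads : List Int) (next_level_heads : List Int) (out : List Int) : Prop := out = expand_heads_alt num_tokens new_idx2old_idx old_idx2new_idx prev_level_heads next_level_heads
instance (num_tokens : Int) (new_idx2old_idx : List (Int × Int)) (old_idx2new_idx : List (Int × Int)) (prev_level_heads : List Int) (next_level_heads : List Int) (out : List Int) : Decidable (Spec_expand_heads num_tokens new_idx2old_idx old_idx2new_idx prev_level_heads next_level_heads out) := by unfold Spec_expand_heads; infer_instance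

-- ===== CLAIM (what is proved, stated in full; the proofs are below) =====
def Claim_equal_expand_heads : Prop := ∀ (num_tokens : Int) (new_idx2old_idx : List (Int × Int)) (old_idx2new_idx : List (Int × Int)) (prev_level_heads : List Int) (next_level_heads : List Int), Dom_expand_heads num_tokens new_idx2old_idx old_idx2new_idx prev_level_heads next_level_heads → Pre_expand_heads num_tokens new_idx2old_idx old_idx2new_idx prev_level_heads next_level_heads → Spec_expand_heads num_tokens new_idx2old_idx old_idx2new_idx prev_level_heads next_level_heads (expand_heads num_tokens new_idx2old_idx old_idx2new_idx prev_level_heads next_level_heads)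

-- ===== LEMMAS AND PROOFS =====

-- B's merge step, named for the proofs
def pvStep (r : List (Int × Int)) (nv : Int → Int) (st : List Int × Nat) (i : Int) : List Int × Nat :=
  match r[st.2]? with
  | some p => if p.1 = i then (st.1 ++ [p.2], st.2 + 1) else (st.1 ++ [nv i], st.2)
  | none => (st.1 ++ [nv i], st.2)

-- merge-loop invariant: the fold produces, per index, the found pair's value or the fallback
theorem pvMerge (r : List (Int × Int)) (nv : Int → Int) (is : List Int)
    (his : is.Pairwise (· < ·)) :
    ∀ (out : List Int) (k : Nat),
    ((r.drop k).map Prod.fst).Pairwise (· < ·) →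
    (∀ p ∈ r.drop k, p.1 ∈ is) →
    (is.foldl (pvStep r nv) (out, k)).1 =
      out ++ is.map (fun i =>
        match (r.drop k).find? (fun p => p.1 == i) with
        | some p => p.2
        | none => nv i) := by
  induction is with
  | nil => intro out k _ _; simp
  | cons i t ih =>
    intro out k hr hsub
    have htp : t.Pairwise (· < ·) := his.tail
    have hit : ∀ j ∈ t, i < j := by
      intro j hj; exact (List.pairwise_cons.mp his).1 j hj
    simp only [List.foldl_cons]
    cases hk : r[k]? with
    | none =>
      have hdrop : r.drop k = [] := by
        have : r.length ≤ k := by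
          rcases Nat.lt_or_ge k r.length with h | h
          · exact absurd (List.getElem?_eq_getElem h) (by simp [hk])
          · exact h
        simp [List.drop_eq_nil_of_le this]
      have hstep : pvStep r nv (out, k) i = (out ++ [nv i], k) := by
        simp [pvStep, hk]
      rw [hstep, ih htp (out ++ [nv i]) k (by rw [hdrop]; simp) (by rw [hdrop]; simp)]
      simp [hdrop]
    | some p =>
      have hklt : k < r.length := by
        rcases Nat.lt_or_ge k r.length with h | h
        · exact h
        · rw [List.getElem?_eq_none h] at hk; exact absurd hk (by simp)
      have hdrop : r.drop k = p :: r.drop (k + 1) := by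
        rw [List.drop_eq_getElem_cons hklt]
        congr 1
        have := List.getElem?_eq_getElem hklt
        rw [hk] at this; exact (Option.some_inj.mp this).symm
      have hrt : ((r.drop (k+1)).map Prod.fst).Pairwise (· < ·) := by
        rw [hdrop] at hr; simpa using hr.tail
      have hhead_lt : ∀ q ∈ r.drop (k+1), p.1 < q.1 := by
        intro q hq
        rw [hdrop] at hr
        simp only [List.map_cons, List.pairwise_cons] at hr
        exact hr.1 q.1 (List.mem_map_of_mem hq)
      by_cases hpi : p.1 = i
      · have hstep : pvStep r nv (out, k) i = (out ++ [p.2], k + 1) := by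
          simp [pvStep, hk, hpi]
        have hsub' : ∀ q ∈ r.drop (k+1), q.1 ∈ t := by
          intro q hq
          have hmem : q.1 ∈ i :: t := hsub q (by rw [hdrop]; exact List.mem_cons_of_mem _ hq)
          have : i < q.1 := hpi ▸ hhead_lt q hq
          rcases List.mem_cons.mp hmem with h | h
          · omega
          · exact h
        rw [hstep, ih htp (out ++ [p.2]) (k+1) hrt hsub']
        have hfind_i : (r.drop k).find? (fun q => q.1 == i) = some p := by
          rw [hdrop]; simp [hpi]
        have hfind_t : ∀ j ∈ t, (r.drop k).find? (fun q => q.1 == j) = (r.drop (k+1)).find? (fun q => q.1 == j) := by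
          intro j hj
          rw [hdrop]
          have : (p.1 == j) = false := by
            have := hit j hj; simp; omega
          simp [this]
        simp only [List.map_cons, hfind_i]
        rw [List.append_cons]
        have hmapeq : (t.map fun j => match (r.drop k).find? (fun q => q.1 == j) with
                        | some q => q.2 | none => nv j)
                    = (t.map fun j => match (r.drop (k+1)).find? (fun q => q.1 == j) with
                        | some q => q.2 | none => nv j) :=
          List.map_congr_left (fun j hj => by rw [hfind_t j hj])
        rw [hmapeq]
        simp
      · have hstep : pvStep r nv (out, k) i = (out ++ [nv i], k) := by
          simp [pvStep, hk, hpi]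
        have hp_gt : i < p.1 := by
          have hmem : p.1 ∈ i :: t := hsub p (by rw [hdrop]; exact List.mem_cons_self)
          rcases List.mem_cons.mp hmem with h | h
          · exact absurd h hpi
          · exact hit _ h
        have hall_gt : ∀ q ∈ r.drop k, i < q.1 := by
          intro q hq
          rw [hdrop] at hq
          rcases List.mem_cons.mp hq with h | h
          · subst h; exact hp_gt
          · exact lt_trans hp_gt (hhead_lt q h)
        have hfind_i : (r.drop k).find? (fun q => q.1 == i) = none := by
          rw [List.find?_eq_none]
          intro q hq; have := hall_gt q hq; simp; omega
        have hsub' : ∀ q ∈ r.drop k, q.1 ∈ t := by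
          intro q hq
          have hmem : q.1 ∈ i :: t := hsub q hq
          have := hall_gt q hq
          rcases List.mem_cons.mp hmem with h | h
          · omega
          · exact h
        rw [hstep, ih htp (out ++ [nv i]) k hr hsub']
        simp only [List.map_cons, hfind_i]
        rw [List.append_cons]
        simp

-- with nodup keys, Dict.get? is list membership
theorem pvDictGet (l : List (Int × Int)) (hnd : (l.map Prod.fst).Nodup) (k v : Int) :
    (PySem.Dict.mk l).get? k = some v ↔ (k, v) ∈ l := by
  induction l with
  | nil => simp [PySem.Dict.get?]
  | cons p t ih =>
    obtain ⟨a, b⟩ := p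
    simp only [List.map_cons, List.nodup_cons] at hnd
    rw [PySem.Dict.get?_mk_cons]
    by_cases hak : a = k
    · subst hak
      simp only [beq_self_eq_true, if_true, List.mem_cons, Option.some_inj]
      constructor
      · rintro rfl; exact Or.inl rfl
      · rintro (h | h)
        · exact ((Prod.ext_iff.mp h).2).symm
        · exact absurd (List.mem_map.mpr ⟨_, h, rfl⟩) hnd.1
    · have : (a == k) = false := by simp [hak]
      rw [this]
      simp only [Bool.false_eq_true, if_false, List.mem_cons]
      rw [ih hnd.2]
      constructor
      · exact Or.inr
      · rintro (h | h)
        · exact absurd (congrArg Prod.fst h).symm hak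
        · exact h

theorem pvDictGetNone (l : List (Int × Int)) (k : Int) :
    (PySem.Dict.mk l).get? k = none ↔ ∀ v, (k, v) ∉ l := by
  induction l with
  | nil => simp [PySem.Dict.get?]
  | cons p t ih =>
    obtain ⟨a, b⟩ := p
    rw [PySem.Dict.get?_mk_cons]
    by_cases hak : a = k
    · subst hak
      simp only [beq_self_eq_true, if_true]
      constructor
      · intro h; exact absurd h (by simp)
      · intro h; exact absurd List.mem_cons_self (h b)
    · have : (a == k) = false := by simp [hak]
      rw [this]
      simp only [Bool.false_eq_true, if_false, List.mem_cons]
      rw [ih]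
      constructor
      · intro h v hv
        rcases hv with h' | h'
        · exact hak (congrArg Prod.fst h').symm
        · exact h v h'
      · intro h v hv; exact h v (Or.inr hv)

-- the shared per-entry remapped value
def pvVal (old_idx2new_idx : List (Int × Int)) (prev_level_heads : List Int) (old : Int) : Int :=
  let head_old_idx := (PySem.List.pyGet? prev_level_heads old).getD 0
  if head_old_idx = -1 then -1 else (PySem.Dict.mk old_idx2new_idx).getD head_old_idx 0

theorem expand_heads_eq (num_tokens : Int) (new_idx2old_idx : List (Int × Int)) (old_idx2new_idx : List (Int × Int)) (prev_level_heads : List Int) (next_level_heads : List Int)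
    (hnd : (new_idx2old_idx.map Prod.fst).Nodup) :
    expand_heads num_tokens new_idx2old_idx old_idx2new_idx prev_level_heads next_level_heads =
    expand_heads_alt num_tokens new_idx2old_idx old_idx2new_idx prev_level_heads next_level_heads := by
  unfold expand_heads expand_heads_alt
  simp only []
  set filt := new_idx2old_idx.filter (fun p => decide (0 ≤ p.1 ∧ p.1 < num_tokens)) with hfilt
  set mapped := filt.map (fun p =>
        let head_old_idx := (PySem.List.pyGet? prev_level_heads p.2).getD 0
        (p.1, if head_old_idx = -1 then -1 else (PySem.Dict.mk old_idx2new_idx).getD head_old_idx 0)) with hmapped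
  set remapped := PySem.List.sorted mapped (fun t => t.1) false with hremapped
  set nv : Int → Int := fun i => (PySem.List.pyGet? next_level_heads i).getD 0 with hnv
  -- key facts about remapped
  have hperm : remapped.Perm mapped := PySem.List.sorted_perm mapped (fun t => t.1) false
  have hmf : mapped.map Prod.fst = filt.map Prod.fst := by
    rw [hmapped, List.map_map]; rfl
  have hnd_f : (filt.map Prod.fst).Nodup :=
    hnd.sublist (List.Sublist.map Prod.fst List.filter_sublist)
  have hnd_m : (mapped.map Prod.fst).Nodup := hmf ▸ hnd_f
  have hnd_r : (remapped.map Prod.fst).Nodup := ((hperm.map Prod.fst).nodup_iff).mpr hnd_m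
  have hpw_le : remapped.Pairwise (fun a b => a.1 ≤ b.1) :=
    PySem.List.sorted_pairwise mapped (fun t => t.1)
  have hpw : (remapped.map Prod.fst).Pairwise (· < ·) := by
    have h1 : (remapped.map Prod.fst).Pairwise (· ≤ ·) := List.pairwise_map.mpr hpw_le
    have h2 := List.Pairwise.and h1 (List.Nodup.pairwise_of_forall_ne hnd_r (by intro a ha b hb h; exact h))
    exact h2.imp (fun h => lt_of_le_of_ne h.1 h.2)
  have hsub : ∀ p ∈ remapped, p.1 ∈ PySem.List.pyRange 0 num_tokens 1 := by
    intro p hp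
    have hpm : p ∈ mapped := hperm.mem_iff.mp hp
    rw [hmapped] at hpm
    obtain ⟨q, hq, hqe⟩ := List.mem_map.mp hpm
    rw [hfilt, List.mem_filter] at hq
    have := of_decide_eq_true hq.2
    rw [PySem.List.mem_pyRange_one]
    have : 0 ≤ q.1 ∧ q.1 < num_tokens := this
    have hfst : p.1 = q.1 := by rw [← hqe]
    omega
  have hpwR : (PySem.List.pyRange 0 num_tokens 1).Pairwise (· < ·) := by
    rw [List.pairwise_iff_getElem]
    intro a b ha hb hab
    rw [PySem.List.getElem_pyRange_one, PySem.List.getElem_pyRange_one]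
    omega
  -- the merge lemma with k = 0
  have hmerge := pvMerge remapped nv (PySem.List.pyRange 0 num_tokens 1) hpwR [] 0
    (by simpa using hpw) (by simpa using hsub)
  simp only [List.drop_zero, List.nil_append] at hmerge
  refine Eq.trans ?_ hmerge.symm
  apply List.map_congr_left
  intro i hi
  have hi' : 0 ≤ i ∧ i < num_tokens := by
    rw [PySem.List.mem_pyRange_one] at hi; omega
  -- relate find? on remapped to Dict.get? on new_idx2old_idx
  cases hg : (PySem.Dict.mk new_idx2old_idx).get? i with
  | some old =>
    have hmem : (i, old) ∈ new_idx2old_idx := (pvDictGet new_idx2old_idx hnd i old).mp hg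
    have hmemf : (i, old) ∈ filt := by
      rw [hfilt, List.mem_filter]
      exact ⟨hmem, by simp; omega⟩
    have hmemm : (i, pvVal old_idx2new_idx prev_level_heads old) ∈ mapped := by
      rw [hmapped]
      exact List.mem_map.mpr ⟨(i, old), hmemf, rfl⟩
    have hmemr : (i, pvVal old_idx2new_idx prev_level_heads old) ∈ remapped :=
      hperm.mem_iff.mpr hmemm
    have hfind : remapped.find? (fun p => p.1 == i) = some (i, pvVal old_idx2new_idx prev_level_heads old) := by
      cases hf : remapped.find? (fun p => p.1 == i) with
      | none =>
        rw [List.find?_eq_none] at hf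
        exact absurd (by simp : (((i, pvVal old_idx2new_idx prev_level_heads old) : Int × Int).1 == i) = true)
          (hf _ hmemr)
      | some q =>
        have hqm : q ∈ remapped := List.mem_of_find?_eq_some hf
        have hqi : q.1 = i := by simpa using List.find?_some hf
        have : q = (i, pvVal old_idx2new_idx prev_level_heads old) := by
          have := List.inj_on_of_nodup_map hnd_r hqm hmemr (by rw [hqi])
          exact this
        rw [this]
    simp only [hfind]
    rfl
  | none =>
    have hnomem := (pvDictGetNone new_idx2old_idx i).mp hg
    have hfind : remapped.find? (fun p => p.1 == i) = none := by
      rw [List.find?_eq_none]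
      intro q hq hqq
      have hqi : q.1 = i := by simpa using hqq
      have hqm : q ∈ mapped := hperm.mem_iff.mp hq
      rw [hmapped] at hqm
      obtain ⟨w, hw, hwe⟩ := List.mem_map.mp hqm
      rw [hfilt, List.mem_filter] at hw
      have hwfst : w.1 = i := by rw [← hqi, ← hwe]
      exact hnomem w.2 (by rw [← hwfst]; exact hw.1)
    simp only [hfind]
    rfl
  -- the fold shape: identify the literal foldl function with pvStep
  -- (handled definitionally by rfl in the branches above)

-- ===== VERDICT (by name: the statement is the Claim_ definition above) =====
theorem expand_heads_spec : Claim_equal_expand_heads := by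
  intro num_tokens new_idx2old_idx old_idx2new_idx prev_level_heads next_level_heads _ hpre
  unfold Spec_expand_heads
  exact expand_heads_eq num_tokens new_idx2old_idx old_idx2new_idx prev_level_heads next_level_heads hpre.1
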